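-- pv_equiv track=rewrite | github.com/nagiteja/PaperScope-AI | app.py | _get_recent_history
-- ===== SOURCE A (Python) =====
-- from typing import Dict, List
--
-- def _get_recent_history(
--     history: List[Dict[str, str]],
-- ) -> List[Dict[str, str]]:
--     recent: List[Dict[str, str]] = []
--     counts = {"user": 0, "assistant": 0}
--     for msg in reversed(history):
--         role = msg.get("role")
--         if role in counts and counts[role] < 2:
--             recent.append(msg)
--             counts[role] += 1
--         if counts["user"] == 2 and counts["assistant"] == 2:
--             break
--     return list(reversed(recent))
-- ===== SOURCE B (Python) =====
-- def _get_recent_history(history):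
--     total_user = 0
--     total_assistant = 0
--     for msg in history:
--         role = msg.get("role")
--         if role == "user":
--             total_user += 1
--         elif role == "assistant":
--             total_assistant += 1
--     result = []
--     seen_user = 0
--     seen_assistant = 0
--     for msg in history:
--         role = msg.get("role")
--         if role == "user":
--             seen_user += 1
--             if seen_user > total_user - 2:
--                 result.append(msg)
--         elif role == "assistant":
--             seen_assistant += 1
--             if seen_assistant > total_assistant - 2:
--                 result.append(msg)
--     return result
-- ===== Notes on version B (the rewrite author's own statement) =====
-- stated objective: alternative
-- what changed: Replaces A's reverse-iterate/append/break/re-reverse accumulation with two forward passes: first count the total user and assistant messages, then emit in one forward sweep each message whose per-role occurrence number is among the last two.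
import Mathlib
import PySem

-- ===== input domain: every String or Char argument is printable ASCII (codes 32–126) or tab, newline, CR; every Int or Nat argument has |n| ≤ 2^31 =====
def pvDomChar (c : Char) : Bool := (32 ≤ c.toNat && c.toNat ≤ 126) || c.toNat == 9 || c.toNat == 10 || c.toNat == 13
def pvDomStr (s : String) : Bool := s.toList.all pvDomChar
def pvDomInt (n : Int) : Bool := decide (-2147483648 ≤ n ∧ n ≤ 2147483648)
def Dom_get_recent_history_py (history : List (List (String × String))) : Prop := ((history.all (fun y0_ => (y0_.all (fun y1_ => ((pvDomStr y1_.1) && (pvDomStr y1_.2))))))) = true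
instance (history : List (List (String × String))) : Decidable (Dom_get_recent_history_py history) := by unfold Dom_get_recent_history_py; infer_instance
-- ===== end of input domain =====

-- B replaces A's reverse-iterate/append/break/re-reverse loop by two forward passes
-- (count per role, then keep each message whose per-role occurrence is among the last two);
-- same cost, no reversal and no break.

-- msg.get("role") (first-match lookup on the association list)
def pvRole (m : List (String × String)) : Option String := (PySem.Dict.mk m).get? "role"

-- ===== PORT A =====
-- the loop over reversed(history): state = (recent, counts-dict); break returns recent early
def pvALoop : List (List (String × String)) → List (List (String × String)) →
    PySem.Dict String Int → List (List (String × String))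
  | [], recent, _ => recent
  | m :: rest, recent, counts =>
    match pvRole m with
    | some r =>
      match counts.get? r with
      | some c =>
        if c < 2 then
          let recent' := recent ++ [m]
          let counts' := counts.insert r (c + 1)
          if counts'.getD "user" 0 == 2 && counts'.getD "assistant" 0 == 2 then recent'
          else pvALoop rest recent' counts'
        else
          if counts.getD "user" 0 == 2 && counts.getD "assistant" 0 == 2 then recent
          else pvALoop rest recent counts
      | none =>
        if counts.getD "user" 0 == 2 && counts.getD "assistant" 0 == 2 then recent
        else pvALoop rest recent counts
    | none =>
      if counts.getD "user" 0 == 2 && counts.getD "assistant" 0 == 2 then recent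
      else pvALoop rest recent counts

def get_recent_history_py (history : List (List (String × String))) : List (List (String × String)) :=
  (pvALoop history.reverse [] (PySem.Dict.mk [("user", 0), ("assistant", 0)])).reverse

-- ===== PORT B =====
-- first forward pass of Source B: count the user / assistant messages
def pvTotals : List (List (String × String)) → Int → Int → Int × Int
  | [], tu, ta => (tu, ta)
  | m :: rest, tu, ta =>
    if pvRole m = some "user" then pvTotals rest (tu + 1) ta
    else if pvRole m = some "assistant" then pvTotals rest tu (ta + 1)
    else pvTotals rest tu ta

-- second forward pass of Source B: keep msg when its occurrence number exceeds total-2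
def pvBLoop : List (List (String × String)) → Int → Int → Int → Int → List (List (String × String))
  | [], _, _, _, _ => []
  | m :: rest, tu, ta, su, sa =>
    if pvRole m = some "user" then
      (if su + 1 > tu - 2 then [m] else []) ++ pvBLoop rest tu ta (su + 1) sa
    else if pvRole m = some "assistant" then
      (if sa + 1 > ta - 2 then [m] else []) ++ pvBLoop rest tu ta su (sa + 1)
    else pvBLoop rest tu ta su sa

def get_recent_history_py_alt (history : List (List (String × String))) : List (List (String × String)) :=
  let t := pvTotals history 0 0
  pvBLoop history t.1 t.2 0 0

-- ===== PRECONDITION & SPEC =====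
def Spec_get_recent_history_py (history : List (List (String × String))) (out : List (List (String × String))) : Prop := out = get_recent_history_py_alt history
instance (history : List (List (String × String))) (out : List (List (String × String))) : Decidable (Spec_get_recent_history_py history out) := by unfold Spec_get_recent_history_py; infer_instance

-- ===== CLAIM (what is proved, stated in full; the proofs are below) =====
def Claim_equal_get_recent_history_py : Prop := ∀ (history : List (List (String × String))), Dom_get_recent_history_py history → Spec_get_recent_history_py history (get_recent_history_py history)

-- ===== LEMMAS AND PROOFS =====

-- Bool predicates for counting
def pvPu (m : List (String × String)) : Bool := decide (pvRole m = some "user")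
def pvPa (m : List (String × String)) : Bool := decide (pvRole m = some "assistant")

-- the two-key counts dict of A, parametrised by the two counters
def pvInitD (cu ca : Int) : PySem.Dict String Int := PySem.Dict.mk [("user", cu), ("assistant", ca)]

-- break-free version of A's scan over the reversed history
def pvTake : List (List (String × String)) → Int → Int → List (List (String × String))
  | [], _, _ => []
  | m :: t, cu, ca =>
    if pvPu m ∧ cu < 2 then m :: pvTake t (cu + 1) ca
    else if pvPa m ∧ ca < 2 then m :: pvTake t cu (ca + 1)
    else pvTake t cu ca

-- forward selection: keep m iff fewer than 2 - c same-role messages follow it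
def pvSel : List (List (String × String)) → Int → Int → List (List (String × String))
  | [], _, _ => []
  | m :: t, cu, ca =>
    (if pvPu m ∧ cu + (t.countP pvPu : Int) < 2 then [m]
     else if pvPa m ∧ ca + (t.countP pvPa : Int) < 2 then [m]
     else []) ++ pvSel t cu ca

theorem pvRole_not_both {m : List (String × String)} : pvPu m = true → pvPa m = false := by
  simp [pvPu, pvPa]; intro h; simp [h]

theorem pvGetMkNil {r : String} : (PySem.Dict.mk ([] : List (String × Int))).get? r = none := rfl

theorem pvInitD_get? (cu ca : Int) (r : String) :
    (pvInitD cu ca).get? r =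
      if r = "user" then some cu else if r = "assistant" then some ca else none := by
  rw [pvInitD, PySem.Dict.get?_mk_cons, PySem.Dict.get?_mk_cons, pvGetMkNil]
  by_cases hu : r = "user"
  · subst hu; simp
  · by_cases ha : r = "assistant"
    · subst ha
      rw [if_neg (by decide : ("user" == "assistant") ≠ true), if_pos (by decide),
        if_neg (by simp), if_pos rfl]
    · have h1 : ("user" == r) = false := by simp; exact fun h => hu h.symm
      have h2 : ("assistant" == r) = false := by simp; exact fun h => ha h.symm
      rw [h1, h2]; simp [hu, ha]

theorem pvInitD_getD (cu ca : Int) (r : String) :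
    (pvInitD cu ca).getD r 0 =
      if r = "user" then cu else if r = "assistant" then ca else 0 := by
  rw [PySem.Dict.getD_eq_get?_getD, pvInitD_get?]
  by_cases hu : r = "user" <;> by_cases ha : r = "assistant" <;> simp [hu, ha]

theorem pvInitD_insert_user (cu ca v : Int) :
    (pvInitD cu ca).insert "user" v = pvInitD v ca := by
  apply PySem.Dict.ext
  rw [PySem.Dict.items_insert_of_contains] <;> simp [pvInitD]

theorem pvInitD_insert_assistant (cu ca v : Int) :
    (pvInitD cu ca).insert "assistant" v = pvInitD cu v := by
  apply PySem.Dict.ext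
  rw [PySem.Dict.items_insert_of_contains] <;> simp [pvInitD]

theorem pvTake_sat (r : List (List (String × String))) {cu ca : Int}
    (hcu : 2 ≤ cu) (hca : 2 ≤ ca) : pvTake r cu ca = [] := by
  induction r generalizing cu ca with
  | nil => rfl
  | cons m t ih =>
    rw [pvTake]
    have h1 : ¬ (pvPu m = true ∧ cu < 2) := by omega
    have h2 : ¬ (pvPa m = true ∧ ca < 2) := by omega
    simp only [h1, h2, if_false]
    exact ih hcu hca

-- the break check of A: either stop (and then the break-free scan adds nothing) or continue
theorem pvBreakStep {cu ca : Int} (t recent : List (List (String × String)))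
    (h : pvALoop t recent (pvInitD cu ca) = recent ++ pvTake t cu ca) :
    (if (cu == 2 && ca == 2) = true then recent else pvALoop t recent (pvInitD cu ca)) =
      recent ++ pvTake t cu ca := by
  by_cases hb : (cu == 2 && ca == 2) = true
  · simp only [Bool.and_eq_true, beq_iff_eq] at hb
    rw [if_pos (by simp [hb.1, hb.2]), pvTake_sat t (by omega) (by omega), List.append_nil]
  · rw [if_neg hb]; exact h

theorem pvALoop_eq_take (r : List (List (String × String)))
    (recent : List (List (String × String))) {cu ca : Int}
    (hcu0 : 0 ≤ cu) (hcu2 : cu ≤ 2) (hca0 : 0 ≤ ca) (hca2 : ca ≤ 2) :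
    pvALoop r recent (pvInitD cu ca) = recent ++ pvTake r cu ca := by
  induction r generalizing recent cu ca with
  | nil => simp [pvALoop, pvTake]
  | cons m t ih =>
    rw [pvALoop, pvTake]
    cases hrole : pvRole m with
    | none =>
      have hpu : pvPu m = false := by simp [pvPu, hrole]
      have hpa : pvPa m = false := by simp [pvPa, hrole]
      simp only [hpu, hpa, false_and, if_false, pvInitD_getD, String.reduceEq, reduceIte]
      exact pvBreakStep t recent (ih recent hcu0 hcu2 hca0 hca2)
    | some rl =>
      by_cases hu : rl = "user"
      · subst hu
        have hpu : pvPu m = true := by simp [pvPu, hrole]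
        have hpa : pvPa m = false := pvRole_not_both hpu
        simp only [pvInitD_get?, pvInitD_getD, pvInitD_insert_user, hpu, hpa, true_and,
          false_and, if_false, String.reduceEq, reduceIte]
        by_cases hc : cu < 2
        · rw [if_pos hc, if_pos hc,
            pvBreakStep (cu := cu + 1) (ca := ca) t (recent ++ [m])
              (ih (recent ++ [m]) (by omega) (by omega) hca0 hca2)]
          simp
        · rw [if_neg hc, if_neg hc]
          exact pvBreakStep t recent (ih recent hcu0 hcu2 hca0 hca2)
      · by_cases ha : rl = "assistant"
        · subst ha
          have hpa : pvPa m = true := by simp [pvPa, hrole]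
          have hpu : pvPu m = false := by simp [pvPu, hrole]
          simp only [pvInitD_get?, pvInitD_getD, pvInitD_insert_assistant, hpu, hpa, true_and,
            false_and, if_false, String.reduceEq, reduceIte]
          by_cases hc : ca < 2
          · rw [if_pos hc, if_pos hc,
              pvBreakStep (cu := cu) (ca := ca + 1) t (recent ++ [m])
                (ih (recent ++ [m]) hcu0 hcu2 (by omega) (by omega))]
            simp
          · rw [if_neg hc, if_neg hc]
            exact pvBreakStep t recent (ih recent hcu0 hcu2 hca0 hca2)
        · have hpu : pvPu m = false := by simp [pvPu, hrole, hu]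
          have hpa : pvPa m = false := by simp [pvPa, hrole, ha]
          simp only [pvInitD_get?, pvInitD_getD, hpu, hpa, false_and, if_false,
            if_neg hu, if_neg ha, String.reduceEq, reduceIte]
          exact pvBreakStep t recent (ih recent hcu0 hcu2 hca0 hca2)

theorem pvTake_append (l1 l2 : List (List (String × String))) {cu ca : Int}
    (hcu : cu ≤ 2) (hca : ca ≤ 2) :
    pvTake (l1 ++ l2) cu ca =
      pvTake l1 cu ca ++
        pvTake l2 (min 2 (cu + (l1.countP pvPu : Int))) (min 2 (ca + (l1.countP pvPa : Int))) := by
  induction l1 generalizing cu ca with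
  | nil =>
    simp only [List.nil_append, pvTake, List.countP_nil, Nat.cast_zero, add_zero]
    rw [min_eq_right hcu, min_eq_right hca]
  | cons m t ih =>
    simp only [List.cons_append, pvTake, List.countP_cons]
    by_cases h1 : pvPu m = true ∧ cu < 2
    · rw [if_pos h1, if_pos h1, ih (by omega) hca, List.cons_append]
      have hpa := pvRole_not_both h1.1
      simp [h1.1, hpa]
      ring_nf
    · rw [if_neg h1, if_neg h1]
      by_cases h2 : pvPa m = true ∧ ca < 2
      · rw [if_pos h2, if_pos h2, ih hcu (by omega), List.cons_append]
        have hpu : pvPu m = false := by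
          cases hpv : pvPu m
          · rfl
          · exact absurd h2.1 (by simp [pvRole_not_both hpv])
        simp [h2.1, hpu]
        ring_nf
      · rw [if_neg h2, ih hcu hca]
        by_cases hpu : pvPu m = true
        · have hpa := pvRole_not_both hpu
          have hc : ¬ cu < 2 := fun hlt => h1 ⟨hpu, hlt⟩
          have hcu2 : cu = 2 := by omega
          simp [hpu, hpa, hcu2]
          congr 1 <;> omega
        · simp only [Bool.not_eq_true] at hpu
          by_cases hpa : pvPa m = true
          · have hc : ¬ ca < 2 := fun hlt => h2 ⟨hpa, hlt⟩
            have hca2 : ca = 2 := by omega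
            simp [hpu, hpa, hca2]
            congr 1 <;> omega
          · simp only [Bool.not_eq_true] at hpa
            simp [hpu, hpa]

theorem pvTake_reverse_eq_sel (h : List (List (String × String))) {cu ca : Int}
    (hcu : cu ≤ 2) (hca : ca ≤ 2) :
    (pvTake h.reverse cu ca).reverse = pvSel h cu ca := by
  induction h generalizing cu ca with
  | nil => rfl
  | cons m t ih =>
    rw [List.reverse_cons, pvTake_append t.reverse [m] hcu hca, List.reverse_append, ih hcu hca,
      pvSel]
    congr 1
    rw [pvTake]
    have hcnt_u : (t.reverse.countP pvPu : Int) = (t.countP pvPu : Int) := by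
      rw [List.countP_reverse]
    have hcnt_a : (t.reverse.countP pvPa : Int) = (t.countP pvPa : Int) := by
      rw [List.countP_reverse]
    by_cases h1 : pvPu m = true ∧ cu + (t.countP pvPu : Int) < 2
    · rw [if_pos h1, if_pos (by rw [hcnt_u]; exact ⟨h1.1, by omega⟩)]
      rfl
    · rw [if_neg h1, if_neg (by rw [hcnt_u]; intro hc; exact h1 ⟨hc.1, by omega⟩)]
      by_cases h2 : pvPa m = true ∧ ca + (t.countP pvPa : Int) < 2
      · rw [if_pos h2, if_pos (by rw [hcnt_a]; exact ⟨h2.1, by omega⟩)]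
        rfl
      · rw [if_neg h2, if_neg (by rw [hcnt_a]; intro hc; exact h2 ⟨hc.1, by omega⟩)]
        rfl

theorem pvTotals_eq (h : List (List (String × String))) (tu ta : Int) :
    pvTotals h tu ta = (tu + (h.countP pvPu : Int), ta + (h.countP pvPa : Int)) := by
  induction h generalizing tu ta with
  | nil => simp [pvTotals]
  | cons m t ih =>
    rw [pvTotals]
    by_cases hu : pvRole m = some "user"
    · have hpu : pvPu m = true := by simp [pvPu, hu]
      have hpa : pvPa m = false := pvRole_not_both hpu
      rw [if_pos hu, ih]
      simp [List.countP_cons, hpu, hpa]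
      ring
    · rw [if_neg hu]
      have hpu : pvPu m = false := by simp [pvPu, hu]
      by_cases ha : pvRole m = some "assistant"
      · have hpa : pvPa m = true := by simp [pvPa, ha]
        rw [if_pos ha, ih]
        simp [List.countP_cons, hpu, hpa]
        ring
      · have hpa : pvPa m = false := by simp [pvPa, ha]
        rw [if_neg ha, ih]
        simp [List.countP_cons, hpu, hpa]

theorem pvBLoop_eq_sel (h : List (List (String × String))) (tu ta su sa : Int)
    (htu : tu = su + (h.countP pvPu : Int)) (hta : ta = sa + (h.countP pvPa : Int)) :
    pvBLoop h tu ta su sa = pvSel h 0 0 := by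
  induction h generalizing su sa with
  | nil => rfl
  | cons m t ih =>
    rw [pvBLoop, pvSel]
    by_cases hu : pvRole m = some "user"
    · have hpu : pvPu m = true := by simp [pvPu, hu]
      have hpa : pvPa m = false := pvRole_not_both hpu
      rw [if_pos hu]
      have hcnt : tu = su + 1 + (t.countP pvPu : Int) := by
        rw [htu]; simp [List.countP_cons, hpu]; push_cast; omega
      have hta' : ta = sa + (t.countP pvPa : Int) := by
        rw [hta]; simp [List.countP_cons, hpa]
      rw [ih (su + 1) sa hcnt hta']
      congr 1
      by_cases hgt : su + 1 > tu - 2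
      · rw [if_pos hgt, if_pos ⟨hpu, by omega⟩]
      · rw [if_neg hgt, if_neg (by intro hc; have := hc.2; exact hgt (by omega)),
          if_neg (by simp [hpa])]
    · rw [if_neg hu]
      have hpu : pvPu m = false := by simp [pvPu, hu]
      by_cases ha : pvRole m = some "assistant"
      · have hpa : pvPa m = true := by simp [pvPa, ha]
        rw [if_pos ha]
        have htu' : tu = su + (t.countP pvPu : Int) := by
          rw [htu]; simp [List.countP_cons, hpu]
        have hcnt : ta = sa + 1 + (t.countP pvPa : Int) := by
          rw [hta]; simp [List.countP_cons, hpa]; push_cast; omega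
        rw [ih su (sa + 1) htu' hcnt]
        congr 1
        by_cases hgt : sa + 1 > ta - 2
        · rw [if_pos hgt, if_neg (by simp [hpu]), if_pos ⟨hpa, by omega⟩]
        · rw [if_neg hgt, if_neg (by simp [hpu]),
            if_neg (by intro hc; have := hc.2; exact hgt (by omega))]
      · have hpa : pvPa m = false := by simp [pvPa, ha]
        rw [if_neg ha]
        have htu' : tu = su + (t.countP pvPu : Int) := by
          rw [htu]; simp [List.countP_cons, hpu]
        have hta' : ta = sa + (t.countP pvPa : Int) := by
          rw [hta]; simp [List.countP_cons, hpa]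
        rw [ih su sa htu' hta']
        simp [hpu, hpa]

-- ===== VERDICT (by name: the statement is the Claim_ definition above) =====
theorem get_recent_history_py_spec : Claim_equal_get_recent_history_py := by
  intro history _
  show get_recent_history_py history = get_recent_history_py_alt history
  rw [get_recent_history_py, get_recent_history_py_alt]
  have h0 : PySem.Dict.mk [("user", (0 : Int)), ("assistant", 0)] = pvInitD 0 0 := rfl
  rw [h0, pvALoop_eq_take _ [] (by norm_num) (by norm_num) (by norm_num) (by norm_num),
    List.nil_append, pvTake_reverse_eq_sel _ (by norm_num) (by norm_num), pvTotals_eq]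
  exact (pvBLoop_eq_sel history _ _ 0 0 (by push_cast; ring) (by push_cast; ring)).symm
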